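-- pv_equiv track=rewrite | github.com/sungyeong98/leetcode | 2640-find-the-score-of-all-prefixes-of-an-array/2640-find-the-score-of-all-prefixes-of-an-array.py | findPrefixScore
-- ===== SOURCE A (Python) =====
-- from typing import List
--
-- def findPrefixScore(nums: List[int]) -> List[int]:
--     conver=[]
--     result=[]
--     max_num=0
--     for i in range(len(nums)):
--         max_num=max(max_num,nums[i])
--         conver.append(nums[i]+max_num)
--         if not result:
--             result.append(conver[-1])
--         else:
--             result.append(result[-1]+conver[-1])
--     return result
-- ===== SOURCE B (Python) =====
-- def findPrefixScore(nums):
--     # pass 1: prefix sums of nums alone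
--     ps = []
--     s = 0
--     for x in nums:
--         s += x
--         ps.append(s)
--     # pass 2: score[i] = ps[i] + (cumulative sum of the running max, floored at 0).
--     # The running max is constant between "record" positions, so its cumulative sum
--     # is kept as base (closed segments) plus m * (length of the open segment),
--     # a value-times-length formula instead of accumulating a converted array.
--     out = []
--     base = 0   # sum of the running max over all closed segments
--     m = 0      # current running max (value of the open segment)
--     start = 0  # index where the open segment begins
--     for i, (x, p) in enumerate(zip(nums, ps)):
--         if x > m:
--             base += m * (i - start)
--             m = x
--             start = i
--         out.append(p + base + m * (i - start + 1))
--     return out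
-- ===== Notes on version B (the rewrite author's own statement) =====
-- stated objective: alternative
-- what changed: B splits score[i] into prefix-sum(nums)[i] plus the cumulative sum of the running max, and computes the latter in closed form per record segment (value times segment length) instead of building A's converted array and prefix-summing it.
import Mathlib
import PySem

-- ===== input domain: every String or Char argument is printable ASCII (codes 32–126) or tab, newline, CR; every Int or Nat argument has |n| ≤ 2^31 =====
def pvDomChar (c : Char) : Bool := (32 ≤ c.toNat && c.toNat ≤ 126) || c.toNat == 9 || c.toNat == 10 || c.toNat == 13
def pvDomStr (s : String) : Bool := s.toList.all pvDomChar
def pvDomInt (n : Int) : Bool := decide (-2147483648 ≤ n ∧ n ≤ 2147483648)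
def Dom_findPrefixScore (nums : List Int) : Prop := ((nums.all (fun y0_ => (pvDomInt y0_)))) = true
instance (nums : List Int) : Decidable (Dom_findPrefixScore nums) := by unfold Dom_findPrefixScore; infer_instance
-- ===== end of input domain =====

-- B splits score[i] into prefix-sum(nums)[i] + cumulative running-max, the latter in
-- closed form per record segment (value × length); objective: alternative algorithm.

-- ===== PORT A =====
-- loop body of A's 'for i in range(len(nums))', state = (conver, result, max_num)
def pvStepA (nums : List Int) (st : List Int × List Int × Int) (i : Int) :
    List Int × List Int × Int :=
  let conver := st.1
  let result := st.2.1
  let max_num := st.2.2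
  let max_num' := max max_num (PySem.List.pyGetD nums i 0)   -- nums[i], i always in range
  let conver' := conver ++ [PySem.List.pyGetD nums i 0 + max_num']
  let result' :=
    if result = [] then result ++ [conver'.getLast!]          -- conver[-1] on nonempty conver
    else result ++ [result.getLast! + conver'.getLast!]       -- result[-1] + conver[-1]
  (conver', result', max_num')

def findPrefixScore (nums : List Int) : List Int :=
  ((PySem.List.pyRange 0 (nums.length : Int) 1).foldl (pvStepA nums) ([], [], 0)).2.1

-- ===== PORT B =====
-- pass 1: prefix sums (Python's append loop with accumulator s, as structural recursion)
def pvPrefixSums : List Int → Int → List Int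
  | [], _ => []
  | x :: xs, s => (s + x) :: pvPrefixSums xs (s + x)

-- pass 2 loop body: state = (out, base, m, start), element = (i, (x, p))
def pvSegStep (st : List Int × Int × Int × Int) (e : Int × (Int × Int)) :
    List Int × Int × Int × Int :=
  let out := st.1; let base := st.2.1; let m := st.2.2.1; let start := st.2.2.2
  let i := e.1; let x := e.2.1; let p := e.2.2
  if x > m then
    let base' := base + m * (i - start)
    (out ++ [p + base' + x * (i - i + 1)], base', x, i)
  else
    (out ++ [p + base + m * (i - start + 1)], base, m, start)

def findPrefixScore_alt (nums : List Int) : List Int :=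
  let ps := pvPrefixSums nums 0
  ((PySem.List.enumerate (nums.zip ps) 0).foldl pvSegStep ([], 0, 0, 0)).1

-- ===== PRECONDITION & SPEC =====
def Spec_findPrefixScore (nums : List Int) (out : List Int) : Prop := out = findPrefixScore_alt nums
instance (nums : List Int) (out : List Int) : Decidable (Spec_findPrefixScore nums out) := by unfold Spec_findPrefixScore; infer_instance

-- ===== CLAIM (what is proved, stated in full; the proofs are below) =====
def Claim_equal_findPrefixScore : Prop := ∀ (nums : List Int), Dom_findPrefixScore nums → Spec_findPrefixScore nums (findPrefixScore nums)

-- ===== LEMMAS AND PROOFS =====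
theorem pv_max_eq (m x : Int) : max m x = if x > m then x else m := by
  split <;> omega

-- reference sequence: running maxima of xs with seed m
def pvMaxes : List Int → Int → List Int
  | [], _ => []
  | x :: xs, m =>
    let m' := if x > m then x else m
    m' :: pvMaxes xs m'

-- reference result: prefix sums of the pointwise sums (A's conver array)
def pvRef (xs : List Int) (m s : Int) : List Int :=
  pvPrefixSums ((xs.zip (pvMaxes xs m)).map (fun p => p.1 + p.2)) s

-- A's loop body as a function of the element value (pvStepA nums st i = pvStepA_list st nums[i])
def pvStepA_list (st : List Int × List Int × Int) (x : Int) : List Int × List Int × Int :=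
  let max_num' := max st.2.2 x
  let conver' := st.1 ++ [x + max_num']
  let result' :=
    if st.2.1 = [] then st.2.1 ++ [conver'.getLast!]
    else st.2.1 ++ [st.2.1.getLast! + conver'.getLast!]
  (conver', result', max_num')

-- the fused fold of A equals result ++ the reference
theorem pvStepA_fold (xs : List Int) (conver result : List Int) (m s : Int)
    (h : (result = [] ∧ s = 0) ∨ (result ≠ [] ∧ result.getLast?.getD 0 = s)) :
    (xs.foldl pvStepA_list (conver, result, m)).2.1 = result ++ pvRef xs m s := by
  induction xs generalizing conver result m s with
  | nil => simp [pvRef, pvPrefixSums, pvMaxes]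
  | cons x xs ih =>
    simp only [List.foldl_cons, pvRef, pvMaxes, List.zip_cons_cons, List.map_cons, pvPrefixSums]
    rw [show (if x > m then x else m) = max m x from (pv_max_eq m x).symm]
    have hstep : pvStepA_list (conver, result, m) x
        = (conver ++ [x + max m x], result ++ [s + (x + max m x)], max m x) := by
      rcases h with ⟨h1, h2⟩ | ⟨h1, h2⟩
      · simp [pvStepA_list, h1, h2]
      · simp [pvStepA_list, h1, h2]
    rw [hstep]
    have := ih (conver ++ [x + max m x]) (result ++ [s + (x + max m x)]) (max m x)
        (s + (x + max m x)) (Or.inr ⟨by simp, by simp⟩)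
    simp only [pvRef] at this
    rw [this]
    simp

-- B's segment fold equals out ++ the reference, under the segment invariant
theorem pvSegStep_fold (xs : List Int) (p0 i0 : Int) (out : List Int) (base m start s : Int)
    (h : s = p0 + base + m * (i0 - start)) :
    ((PySem.List.enumerate (xs.zip (pvPrefixSums xs p0)) i0).foldl pvSegStep
        (out, base, m, start)).1 = out ++ pvRef xs m s := by
  induction xs generalizing p0 i0 out base m start s with
  | nil => simp [pvPrefixSums, pvRef, pvMaxes]
  | cons x xs ih =>
    simp only [pvPrefixSums, List.zip_cons_cons, PySem.List.enumerate_cons, List.foldl_cons,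
      pvRef, pvMaxes, List.map_cons]
    by_cases hx : x > m
    · have hstep : pvSegStep (out, base, m, start) (i0, x, p0 + x)
          = (out ++ [p0 + x + (base + m * (i0 - start)) + x * (i0 - i0 + 1)],
             base + m * (i0 - start), x, i0) := by
        simp [pvSegStep, hx]
      rw [hstep]
      have hinv : s + (x + x) = (p0 + x) + (base + m * (i0 - start)) + x * ((i0 + 1) - i0) := by
        rw [h]; ring
      have := ih (p0 + x) (i0 + 1) (out ++ [p0 + x + (base + m * (i0 - start)) + x * (i0 - i0 + 1)]) (base + m * (i0 - start)) x i0 (s + (x + x)) hinv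
      rw [this]
      simp [hx, pvRef]
      rw [h]; ring
    · have hstep : pvSegStep (out, base, m, start) (i0, x, p0 + x)
          = (out ++ [p0 + x + base + m * (i0 - start + 1)], base, m, start) := by
        simp [pvSegStep, hx]
      rw [hstep]
      have hinv : s + (x + m) = (p0 + x) + base + m * ((i0 + 1) - start) := by
        rw [h]; ring
      have := ih (p0 + x) (i0 + 1) (out ++ [p0 + x + base + m * (i0 - start + 1)]) base m start (s + (x + m)) hinv
      rw [this]
      simp [hx, pvRef]
      rw [h]; ring

theorem findPrefixScore_eq (nums : List Int) :
    findPrefixScore nums = findPrefixScore_alt nums := by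
  unfold findPrefixScore findPrefixScore_alt
  rw [show (pvStepA nums) = (fun acc j => pvStepA_list acc (PySem.List.pyGetD nums j 0)) from rfl]
  rw [PySem.List.foldl_pyRange_zero_pyGetD' nums (0 : Int) pvStepA_list
      (([], [], 0) : List Int × List Int × Int)]
  rw [pvStepA_fold nums [] [] 0 0 (Or.inl ⟨rfl, rfl⟩)]
  rw [pvSegStep_fold nums 0 0 [] 0 0 0 0 (by ring)]

-- ===== VERDICT (by name: the statement is the Claim_ definition above) =====
theorem findPrefixScore_spec : Claim_equal_findPrefixScore := by
  intro nums _
  exact findPrefixScore_eq nums
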